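-- pv_equiv track=rewrite | github.com/ThomasSanna/109-python-problems-for-ccps | 11-taxi-zum-zum/11.py | taxi_zum_zum
-- ===== SOURCE A (Python) =====
-- def taxi_zum_zum(moves):
--   dictCoos = {
--     "N" : (0, 1),
--     "E" : (1, 0),
--     "S" : (0, -1),
--     "W" : (-1, 0)
--   }
--   tabCoos = [(0, 1), (1, 0), (0, -1), (-1, 0)]
--   moves = moves.replace("LR", "").replace("RL", "")
--   coos = [0, 0]
--   direction = 0
--
--   for let in moves:
--     if let == 'F':
--       coos[0] += tabCoos[direction][0]
--       coos[1] += tabCoos[direction][1]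
--     else:
--       direction += 1 if let == 'R' else -1+4
--       direction %= 4
--   return coos
-- ===== SOURCE B (Python) =====
-- def taxi_zum_zum(moves):
--   # Collect-then-reduce: one pass keeps only the heading (0..3) and a count of
--   # forward steps per heading; coordinates are computed afterwards as a reduction.
--   vec = [(0, 1), (1, 0), (0, -1), (-1, 0)]
--   counts = [0, 0, 0, 0]
--   heading = 0
--   for c in moves:
--     if c == 'F':
--       counts[heading] += 1
--     elif c == 'R':
--       heading = (heading + 1) % 4
--     else:
--       heading = (heading + 3) % 4
--   return [sum(counts[d] * vec[d][0] for d in range(4)),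
--           sum(counts[d] * vec[d][1] for d in range(4))]
-- ===== Notes on version B (the rewrite author's own statement) =====
-- stated objective: alternative
-- what changed: B drops A's two no-op LR/RL string replaces and splits A's inline coordinate accumulation into a collect-then-reduce pass: one loop counts forward moves per heading (0..3), then the coordinates are computed as a sum of counts times direction vectors.
import Mathlib
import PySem

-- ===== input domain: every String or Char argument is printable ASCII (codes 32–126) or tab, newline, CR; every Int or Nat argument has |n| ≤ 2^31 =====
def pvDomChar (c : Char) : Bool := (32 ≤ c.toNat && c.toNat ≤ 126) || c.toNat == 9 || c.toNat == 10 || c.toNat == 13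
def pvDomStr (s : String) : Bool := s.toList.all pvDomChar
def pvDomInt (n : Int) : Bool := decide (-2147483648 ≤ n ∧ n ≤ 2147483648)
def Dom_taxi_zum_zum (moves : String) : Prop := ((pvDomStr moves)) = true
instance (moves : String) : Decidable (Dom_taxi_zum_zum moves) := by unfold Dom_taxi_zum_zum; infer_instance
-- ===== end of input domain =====

-- B replaces A's inline coordinate updates (after two no-op string replaces) by a
-- collect-then-reduce pass: count forward steps per heading, then reduce with the
-- direction vectors; objective: alternative decomposition.


-- ===== PORT A =====
-- one iteration of A's for-loop; state is (coos[0], coos[1], direction).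
-- direction is always in 0..3 (it is 0 initially and reduced mod 4 after every turn),
-- so the tabCoos indexing never raises; .getD (0,0) is unreachable.
def stepA (st : Int × Int × Int) (c : Char) : Int × Int × Int :=
  if c = 'F' then
    let v := (PySem.List.pyGet? [((0:Int),(1:Int)), (1,0), (0,-1), (-1,0)] st.2.2).getD (0, 0)
    (st.1 + v.1, st.2.1 + v.2, st.2.2)
  else
    (st.1, st.2.1, PySem.Int.mod (st.2.2 + (if c = 'R' then 1 else -1 + 4)) 4)

-- A's dictCoos is dead code (defined, never read) and is omitted.
def taxi_zum_zum (moves : String) : List Int :=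
  let moves2 := PySem.Str.replace (PySem.Str.replace moves "LR" "") "RL" ""
  let r := moves2.toList.foldl stepA (0, 0, 0)
  [r.1, r.2.1]

-- ===== PORT B =====
-- one iteration of B's for-loop; state is (heading, counts).
-- heading is always in 0..3, so counts[heading] += 1 never raises (toNat/getD exact there).
def stepB (st : Int × List Int) (c : Char) : Int × List Int :=
  if c = 'F' then
    (st.1, st.2.set st.1.toNat (st.2.getD st.1.toNat 0 + 1))
  else if c = 'R' then (PySem.Int.mod (st.1 + 1) 4, st.2)
  else (PySem.Int.mod (st.1 + 3) 4, st.2)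

def taxi_zum_zum_alt (moves : String) : List Int :=
  let vec : List (Int × Int) := [(0, 1), (1, 0), (0, -1), (-1, 0)]
  let r := moves.toList.foldl stepB (0, [0, 0, 0, 0])
  [(PySem.List.pyRange 0 4 1).foldl (fun s d => s + r.2.getD d.toNat 0 * (vec.getD d.toNat (0, 0)).1) 0,
   (PySem.List.pyRange 0 4 1).foldl (fun s d => s + r.2.getD d.toNat 0 * (vec.getD d.toNat (0, 0)).2) 0]

-- ===== PRECONDITION & SPEC =====
def Spec_taxi_zum_zum (moves : String) (out : List Int) : Prop := out = taxi_zum_zum_alt moves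
instance (moves : String) (out : List Int) : Decidable (Spec_taxi_zum_zum moves out) := by unfold Spec_taxi_zum_zum; infer_instance

-- ===== CLAIM (what is proved, stated in full; the proofs are below) =====
def Claim_equal_taxi_zum_zum : Prop := ∀ (moves : String), Dom_taxi_zum_zum moves → Spec_taxi_zum_zum moves (taxi_zum_zum moves)

-- ===== LEMMAS AND PROOFS =====

def remPair (a b : Char) : List Char → List Char
  | [] => []
  | [c] => [c]
  | c :: e :: t => if c = a ∧ e = b then remPair a b t else c :: remPair a b (e :: t)

theorem go_spec (a b : Char) : ∀ (fuel : Nat) (l acc : List Char), l.length ≤ fuel →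
    PySem.Chars.replace.go [a, b] [] fuel l acc = acc.reverse ++ remPair a b l := by
  intro fuel
  induction fuel with
  | zero =>
    intro l acc h
    have hl : l = [] := by cases l <;> simp_all
    subst hl
    simp [PySem.Chars.replace.go, remPair]
  | succ n ih =>
    intro l acc h
    match l with
    | [] => simp [PySem.Chars.replace.go, remPair]
    | [c] =>
      rw [PySem.Chars.replace.go]
      have hp : List.isPrefixOf [a, b] [c] = false := by simp [List.isPrefixOf]
      rw [hp]
      simp only [Bool.false_eq_true, if_false]
      rw [ih [] (c :: acc) (by simp)]
      simp [remPair]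
    | c :: e :: t =>
      rw [PySem.Chars.replace.go]
      by_cases hm : c = a ∧ e = b
      · obtain ⟨rfl, rfl⟩ := hm
        have hp : List.isPrefixOf [c, e] (c :: e :: t) = true := by simp [List.isPrefixOf]
        rw [hp]
        simp only [if_true]
        rw [show List.drop (List.length [c, e]) (c :: e :: t) = t by simp]
        rw [ih t _ (by simp at h ⊢; omega)]
        simp [remPair]
      · have hp : List.isPrefixOf [a, b] (c :: e :: t) = false := by
          simp [List.isPrefixOf]; tauto
        rw [hp]
        simp only [Bool.false_eq_true, if_false]
        rw [ih (e :: t) (c :: acc) (by simp at h ⊢; omega)]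
        simp [remPair, hm]

theorem replace_eq_remPair (s : List Char) (a b : Char) :
    PySem.Chars.replace s [a, b] [] = remPair a b s := by
  rw [PySem.Chars.replace]
  simp only [List.isEmpty_cons, Bool.false_eq_true, if_false]
  rw [go_spec a b s.length s [] le_rfl]
  simp

theorem stepA_range (st : Int × Int × Int) (c : Char) (h0 : 0 ≤ st.2.2) (h4 : st.2.2 < 4) :
    0 ≤ (stepA st c).2.2 ∧ (stepA st c).2.2 < 4 := by
  unfold stepA
  split_ifs <;> simp <;> omega

theorem stepA_cancel_LR (x y d : Int) (h0 : 0 ≤ d) (h4 : d < 4) :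
    stepA (stepA (x, y, d) 'L') 'R' = (x, y, d) := by
  simp [stepA]; omega

theorem stepA_cancel_RL (x y d : Int) (h0 : 0 ≤ d) (h4 : d < 4) :
    stepA (stepA (x, y, d) 'R') 'L' = (x, y, d) := by
  simp [stepA]; omega

theorem foldl_remPair (a b : Char)
    (hc : ∀ x y d : Int, 0 ≤ d → d < 4 → stepA (stepA (x, y, d) a) b = (x, y, d)) :
    ∀ (n : Nat) (l : List Char) (x y d : Int), l.length ≤ n → 0 ≤ d → d < 4 →
      (remPair a b l).foldl stepA (x, y, d) = l.foldl stepA (x, y, d) := by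
  intro n
  induction n with
  | zero =>
    intro l x y d h h0 h4
    have hl : l = [] := by cases l <;> simp_all
    subst hl; rfl
  | succ n ih =>
    intro l x y d h h0 h4
    match l with
    | [] => rfl
    | [c] => rfl
    | c :: e :: t =>
      by_cases hm : c = a ∧ e = b
      · obtain ⟨rfl, rfl⟩ := hm
        rw [show remPair c e (c :: e :: t) = remPair c e t by simp [remPair]]
        rw [ih t x y d (by simp at h ⊢; omega) h0 h4]
        simp only [List.foldl_cons]
        rw [hc x y d h0 h4]
      · rw [show remPair a b (c :: e :: t) = c :: remPair a b (e :: t) by simp [remPair, hm]]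
        simp only [List.foldl_cons]
        rcases hs : stepA (x, y, d) c with ⟨x', y', d'⟩
        have hr := stepA_range (x, y, d) c h0 h4
        rw [hs] at hr
        exact ih (e :: t) x' y' d' (by simp at h ⊢; omega) hr.1 hr.2

theorem sim_AB : ∀ (l : List Char) (x y d c0 c1 c2 c3 : Int),
    0 ≤ d → d < 4 → x = c1 - c3 → y = c0 - c2 →
    ∃ e0 e1 e2 e3 : Int,
      l.foldl stepB (d, [c0, c1, c2, c3]) = ((l.foldl stepA (x, y, d)).2.2, [e0, e1, e2, e3]) ∧
      (l.foldl stepA (x, y, d)).1 = e1 - e3 ∧ (l.foldl stepA (x, y, d)).2.1 = e0 - e2 := by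
  intro l
  induction l with
  | nil =>
    intro x y d c0 c1 c2 c3 h0 h4 hx hy
    exact ⟨c0, c1, c2, c3, rfl, hx, hy⟩
  | cons c t ih =>
    intro x y d c0 c1 c2 c3 h0 h4 hx hy
    simp only [List.foldl_cons]
    by_cases hF : c = 'F'
    · subst hF
      interval_cases d
      · simpa [stepA, stepB, PySem.List.pyGet?, PySem.List.pyIdx?] using
          ih x (y + 1) 0 (c0 + 1) c1 c2 c3 (by norm_num) (by norm_num) hx (by omega)
      · simpa [stepA, stepB, PySem.List.pyGet?, PySem.List.pyIdx?] using
          ih (x + 1) y 1 c0 (c1 + 1) c2 c3 (by norm_num) (by norm_num) (by omega) hy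
      · simpa [stepA, stepB, PySem.List.pyGet?, PySem.List.pyIdx?] using
          ih x (y - 1) 2 c0 c1 (c2 + 1) c3 (by norm_num) (by norm_num) hx (by omega)
      · simpa [stepA, stepB, PySem.List.pyGet?, PySem.List.pyIdx?] using
          ih (x - 1) y 3 c0 c1 c2 (c3 + 1) (by norm_num) (by norm_num) (by omega) hy
    · by_cases hR : c = 'R'
      · subst hR
        have h1 : (0:Int) ≤ PySem.Int.mod (d + 1) 4 := PySem.Int.mod_nonneg _ (by norm_num)
        have h2 : PySem.Int.mod (d + 1) 4 < 4 := PySem.Int.mod_lt _ (by norm_num)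
        simpa [stepA, stepB] using
          ih x y (PySem.Int.mod (d + 1) 4) c0 c1 c2 c3 h1 h2 hx hy
      · have h1 : (0:Int) ≤ PySem.Int.mod (d + 3) 4 := PySem.Int.mod_nonneg _ (by norm_num)
        have h2 : PySem.Int.mod (d + 3) 4 < 4 := PySem.Int.mod_lt _ (by norm_num)
        have he : stepA (x, y, d) c = (x, y, PySem.Int.mod (d + 3) 4) := by
          simp [stepA, hF, hR]
        have he2 : stepB (d, [c0, c1, c2, c3]) c = (PySem.Int.mod (d + 3) 4, [c0, c1, c2, c3]) := by
          simp [stepB, hF, hR]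
        rw [he, he2]
        exact ih x y (PySem.Int.mod (d + 3) 4) c0 c1 c2 c3 h1 h2 hx hy

theorem taxi_final (moves : String) :
    Spec_taxi_zum_zum moves (taxi_zum_zum moves) := by
  unfold Spec_taxi_zum_zum taxi_zum_zum taxi_zum_zum_alt
  simp only [PySem.Str.toList_replace]
  rw [show ("LR" : String).toList = ['L','R'] from rfl,
      show ("RL" : String).toList = ['R','L'] from rfl,
      show ("" : String).toList = [] from rfl,
      replace_eq_remPair, replace_eq_remPair]
  rw [foldl_remPair 'R' 'L' stepA_cancel_RL (remPair 'L' 'R' moves.toList).length _ 0 0 0 le_rfl (by norm_num) (by norm_num)]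
  rw [foldl_remPair 'L' 'R' stepA_cancel_LR moves.toList.length _ 0 0 0 le_rfl (by norm_num) (by norm_num)]
  obtain ⟨e0, e1, e2, e3, hB, h1, h2⟩ :=
    sim_AB moves.toList 0 0 0 0 0 0 0 (le_refl 0) (by norm_num) (by ring) (by ring)
  rw [hB]
  have hr : PySem.List.pyRange 0 4 1 = [0, 1, 2, 3] := by decide
  rw [hr]
  simp [List.getD]
  omega

-- ===== VERDICT (by name: the statement is the Claim_ definition above) =====
theorem taxi_zum_zum_spec : Claim_equal_taxi_zum_zum := by
  intro moves _
  exact taxi_final moves
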